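-- pv_equiv track=rewrite | github.com/markhliu/mpt | ch13/conn_think.py | back4
-- ===== SOURCE A (Python) =====
-- def back4(x, y, color, board):
--     win = False
--     for dif in (-3, -2, -1, 0):
--         try:
--             if board[x+dif][y-dif] == color\
--             and board[x+dif+1][y-dif-1] == color\
--             and board[x+dif+2][y-dif-2] == color\
--             and board[x+dif+3][y-dif-3] == color\
--             and x+dif >= 0 and y-dif-3 >= 0:
--                 win = True
--         except IndexError:
--             pass
--     return win
-- ===== SOURCE B (Python) =====
-- def back4(x, y, color, board):
--     def ok(i, j):
--         return 0 <= i < len(board) and 0 <= j < len(board[i]) and board[i][j] == color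
--     if not ok(x, y):
--         return False
--     run = 1
--     for s in range(1, 4):          # walk up-left along the anti-diagonal
--         if not ok(x - s, y + s):
--             break
--         run += 1
--     for s in range(1, 4):          # walk down-right
--         if not ok(x + s, y - s):
--             break
--         run += 1
--     return run >= 4
-- ===== Notes on version B (the rewrite author's own statement) =====
-- stated objective: alternative
-- what changed: B replaces A's four overlapping try/except window probes (each re-reading four cells, relying on IndexError and sign guards) with a single bounds-checked run count: verify (x,y) holds color, then walk the anti-diagonal up-left and down-right counting consecutive color cells, returning run >= 4.
import Mathlib
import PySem

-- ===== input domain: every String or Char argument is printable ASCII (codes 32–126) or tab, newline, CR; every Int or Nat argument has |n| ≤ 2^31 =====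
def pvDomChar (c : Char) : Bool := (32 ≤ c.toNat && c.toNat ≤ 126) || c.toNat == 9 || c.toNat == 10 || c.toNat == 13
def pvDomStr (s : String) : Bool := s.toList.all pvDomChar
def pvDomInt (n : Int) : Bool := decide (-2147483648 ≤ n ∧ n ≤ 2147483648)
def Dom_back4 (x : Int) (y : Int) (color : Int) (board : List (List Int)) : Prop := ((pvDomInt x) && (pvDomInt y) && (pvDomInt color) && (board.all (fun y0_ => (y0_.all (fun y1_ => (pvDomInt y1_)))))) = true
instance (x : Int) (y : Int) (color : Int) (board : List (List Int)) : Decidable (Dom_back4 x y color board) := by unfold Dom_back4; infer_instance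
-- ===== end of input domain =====

-- B replaces A's four try/except window probes with a single bounds-checked run count from (x,y); same return value, no speed claim.

-- ===== PORT A =====
-- board[i][j] with Python semantics: negative wrap, none = IndexError
def pvCellA (board : List (List Int)) (i j : Int) : Option Int :=
  match PySem.List.pyGet? board i with
  | none => none
  | some row => PySem.List.pyGet? row j

-- the try-block body for one dif: none = IndexError escaped, some b = the chained condition's value
def pvTry (x y color : Int) (board : List (List Int)) (dif : Int) : Option Bool :=
  match pvCellA board (x+dif) (y-dif) with
  | none => none
  | some v1 =>
    if v1 == color then
      match pvCellA board (x+dif+1) (y-dif-1) with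
      | none => none
      | some v2 =>
        if v2 == color then
          match pvCellA board (x+dif+2) (y-dif-2) with
          | none => none
          | some v3 =>
            if v3 == color then
              match pvCellA board (x+dif+3) (y-dif-3) with
              | none => none
              | some v4 => some (v4 == color && decide (0 ≤ x+dif) && decide (0 ≤ y-dif-3))
            else some false
        else some false
    else some false

-- 'if cond: win = True' ≡ win || cond; 'except IndexError: pass' leaves win unchanged
def back4 (x : Int) (y : Int) (color : Int) (board : List (List Int)) : Bool :=
  [(-3 : Int), -2, -1, 0].foldl
    (fun win dif => match pvTry x y color board dif with
      | none => win
      | some b => win || b) false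

-- ===== PORT B =====
-- Source B's ok(i,j): 0 <= i < len(board) and 0 <= j < len(board[i]) and board[i][j] == color
def pvOk (color : Int) (board : List (List Int)) (i j : Int) : Bool :=
  if 0 ≤ i ∧ 0 ≤ j then
    match PySem.List.pyGet? board i with
    | none => false
    | some row =>
      match PySem.List.pyGet? row j with
      | none => false
      | some v => v == color
  else false

-- Source B's bounded walk: count consecutive color cells in direction (di,dj), at most the fuel
def pvWalk (color : Int) (board : List (List Int)) (i j di dj : Int) : Nat → Nat
  | 0 => 0
  | Nat.succ n => if pvOk color board i j then 1 + pvWalk color board (i+di) (j+dj) di dj n else 0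

def back4_alt (x : Int) (y : Int) (color : Int) (board : List (List Int)) : Bool :=
  if pvOk color board x y then
    decide (1 + pvWalk color board (x-1) (y+1) (-1) 1 3 + pvWalk color board (x+1) (y-1) 1 (-1) 3 ≥ 4)
  else false

-- ===== PRECONDITION & SPEC =====
def Spec_back4 (x : Int) (y : Int) (color : Int) (board : List (List Int)) (out : Bool) : Prop := out = back4_alt x y color board
instance (x : Int) (y : Int) (color : Int) (board : List (List Int)) (out : Bool) : Decidable (Spec_back4 x y color board out) := by unfold Spec_back4; infer_instance

-- ===== CLAIM (what is proved, stated in full; the proofs are below) =====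
def Claim_equal_back4 : Prop := ∀ (x : Int) (y : Int) (color : Int) (board : List (List Int)), Dom_back4 x y color board → Spec_back4 x y color board (back4 x y color board)

-- ===== LEMMAS AND PROOFS =====

theorem pvOk_pos (color : Int) (board : List (List Int)) (i j : Int) (hi : 0 ≤ i) (hj : 0 ≤ j) :
    pvOk color board i j
      = (match pvCellA board i j with | none => false | some v => v == color) := by
  cases h : PySem.List.pyGet? board i <;> simp [pvOk, pvCellA, hi, hj, h]

theorem pvOk_negi (color : Int) (board : List (List Int)) (i j : Int) (hi : ¬ 0 ≤ i) :
    pvOk color board i j = false := by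
  simp [pvOk, hi]

theorem pvOk_negj (color : Int) (board : List (List Int)) (i j : Int) (hj : ¬ 0 ≤ j) :
    pvOk color board i j = false := by
  simp [pvOk, hj]

-- one try-block contributes exactly the conjunction of the four bounds-checked cell tests
theorem pvTry_contrib (x y color : Int) (board : List (List Int)) (dif : Int) (w : Bool) :
    (match pvTry x y color board dif with
      | none => w
      | some b => w || b)
    = (w || (pvOk color board (x+dif) (y-dif) && pvOk color board (x+dif+1) (y-dif-1)
          && pvOk color board (x+dif+2) (y-dif-2) && pvOk color board (x+dif+3) (y-dif-3))) := by
  have step : ∀ o : Option Bool, (match o with | none => w | some b => w || b)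
      = (w || (match o with | none => false | some b => b)) := by
    intro o; cases o <;> simp
  rw [step]
  congr 1
  by_cases hs1 : (0 : Int) ≤ x + dif
  · by_cases hs2 : (0 : Int) ≤ y - dif - 3
    · rw [pvOk_pos _ _ _ _ hs1 (by omega), pvOk_pos _ _ _ _ (by omega) (by omega),
        pvOk_pos _ _ _ _ (by omega) (by omega), pvOk_pos _ _ _ _ (by omega) hs2]
      cases h1 : pvCellA board (x+dif) (y-dif) with
      | none => simp [pvTry, h1]
      | some v1 =>
        by_cases e1 : v1 == color
        · cases h2 : pvCellA board (x+dif+1) (y-dif-1) with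
          | none => simp [pvTry, h1, h2, e1]
          | some v2 =>
            by_cases e2 : v2 == color
            · cases h3 : pvCellA board (x+dif+2) (y-dif-2) with
              | none => simp [pvTry, h1, h2, h3, e1, e2]
              | some v3 =>
                by_cases e3 : v3 == color
                · cases h4 : pvCellA board (x+dif+3) (y-dif-3) with
                  | none => simp [pvTry, h1, h2, h3, h4, e1, e2, e3]
                  | some v4 => simp [pvTry, h1, h2, h3, h4, e1, e2, e3, hs1]; omega
                · simp [pvTry, h1, h2, h3, e1, e2, e3]
            · simp [pvTry, h1, h2, e1, e2]
        · simp [pvTry, h1, e1]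
    · rw [pvOk_negj color board (x+dif+3) (y-dif-3) (by omega)]
      simp only [Bool.and_false]
      cases h1 : pvCellA board (x+dif) (y-dif) with
      | none => simp [pvTry, h1]
      | some v1 =>
        by_cases e1 : v1 == color
        · cases h2 : pvCellA board (x+dif+1) (y-dif-1) with
          | none => simp [pvTry, h1, h2, e1]
          | some v2 =>
            by_cases e2 : v2 == color
            · cases h3 : pvCellA board (x+dif+2) (y-dif-2) with
              | none => simp [pvTry, h1, h2, h3, e1, e2]
              | some v3 =>
                by_cases e3 : v3 == color
                · cases h4 : pvCellA board (x+dif+3) (y-dif-3) with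
                  | none => simp [pvTry, h1, h2, h3, h4, e1, e2, e3]
                  | some v4 => simp [pvTry, h1, h2, h3, h4, e1, e2, e3]; omega
                · simp [pvTry, h1, h2, h3, e1, e2, e3]
            · simp [pvTry, h1, h2, e1, e2]
        · simp [pvTry, h1, e1]
  · rw [pvOk_negi color board (x+dif) (y-dif) hs1]
    simp only [Bool.false_and]
    cases h1 : pvCellA board (x+dif) (y-dif) with
    | none => simp [pvTry, h1]
    | some v1 =>
      by_cases e1 : v1 == color
      · cases h2 : pvCellA board (x+dif+1) (y-dif-1) with
        | none => simp [pvTry, h1, h2, e1]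
        | some v2 =>
          by_cases e2 : v2 == color
          · cases h3 : pvCellA board (x+dif+2) (y-dif-2) with
            | none => simp [pvTry, h1, h2, h3, e1, e2]
            | some v3 =>
              by_cases e3 : v3 == color
              · cases h4 : pvCellA board (x+dif+3) (y-dif-3) with
                | none => simp [pvTry, h1, h2, h3, h4, e1, e2, e3]
                | some v4 => simp [pvTry, h1, h2, h3, h4, e1, e2, e3]; omega
              · simp [pvTry, h1, h2, h3, e1, e2, e3]
          · simp [pvTry, h1, h2, e1, e2]
      · simp [pvTry, h1, e1]

-- ===== VERDICT (by name: the statement is the Claim_ definition above) =====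
theorem back4_spec : Claim_equal_back4 := by
  intro x y color board _
  unfold Spec_back4
  simp only [back4, List.foldl]
  rw [pvTry_contrib, pvTry_contrib, pvTry_contrib, pvTry_contrib]
  simp only [back4_alt]
  simp only [pvWalk]
  ring_nf
  generalize pvOk color board (-3 + x) (3 + y) = p1
  generalize pvOk color board (-2 + x) (2 + y) = p2
  generalize pvOk color board (-1 + x) (1 + y) = p3
  generalize pvOk color board x y = p4
  generalize pvOk color board (1 + x) (-1 + y) = p5
  generalize pvOk color board (2 + x) (-2 + y) = p6
  generalize pvOk color board (3 + x) (-3 + y) = p7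
  revert p1 p2 p3 p4 p5 p6 p7
  decide
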